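-- pv_equiv track=rewrite | github.com/pypi-data/pypi-mirror-25 | packages/ishtar/ishtar-0.99.27.tar.gz/ishtar-0.99.27/ishtar_common/wizards.py | get_deleted
-- ===== SOURCE A (Python) =====
-- def get_deleted(keys):
--     """
--     Get the deleted and non-deleted items in formsets
--     """
--     not_to_delete, to_delete = set(), set()
--     for key in keys:
--         items = key.split('-')
--         if len(items) < 2 or items[-2] in to_delete:
--             continue
--         idx = items[-2]
--         try:
--             int(idx)
--         except:
--             continue
--         if items[-1] == u'DELETE':
--             to_delete.add(idx)
--             if idx in not_to_delete:
--                 not_to_delete.remove(idx)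
--         elif idx not in not_to_delete:
--             not_to_delete.add(idx)
--     return (to_delete, not_to_delete)
-- ===== SOURCE B (Python) =====
-- def get_deleted(keys):
--     """
--     Get the deleted and non-deleted items in formsets
--     """
--     # Stage 1: parse every key into (idx, is_delete), dropping invalid keys.
--     parsed = []
--     for key in keys:
--         items = key.split('-')
--         if len(items) < 2:
--             continue
--         try:
--             int(items[-2])
--         except ValueError:
--             continue
--         parsed.append((items[-2], items[-1] == u'DELETE'))
--     # Stage 2: partition - any DELETE wins, the rest of the seen indices stay.
--     to_delete = {idx for idx, deleted in parsed if deleted}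
--     not_to_delete = {idx for idx, deleted in parsed if not deleted} - to_delete
--     return (to_delete, not_to_delete)
-- ===== Notes on version B (the rewrite author's own statement) =====
-- stated objective: alternative
-- what changed: Replaces A's single stateful loop (skip-if-already-deleted, add/remove on running sets) with a staged pipeline: parse all keys into (idx, is_delete) pairs once, then build the two sets by comprehension and a set difference (any DELETE wins).
import Mathlib
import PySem

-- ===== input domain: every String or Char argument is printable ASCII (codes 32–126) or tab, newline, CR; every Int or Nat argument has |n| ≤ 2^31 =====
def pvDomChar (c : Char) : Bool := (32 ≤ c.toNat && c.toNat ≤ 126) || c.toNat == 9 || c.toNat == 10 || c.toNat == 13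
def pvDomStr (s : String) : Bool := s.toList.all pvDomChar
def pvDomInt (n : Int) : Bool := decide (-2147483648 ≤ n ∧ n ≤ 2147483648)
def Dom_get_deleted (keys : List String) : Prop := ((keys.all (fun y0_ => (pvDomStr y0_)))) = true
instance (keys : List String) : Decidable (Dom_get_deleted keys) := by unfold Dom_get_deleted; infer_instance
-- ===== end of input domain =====

-- B replaces A's single stateful running-set loop by a staged pipeline: parse all keys once, then partition by comprehensions and a set difference; alternative decomposition, same cost.


-- ===== PORT A =====
def get_deleted_inner (st : PySem.Set String × PySem.Set String) (items : List String) :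
    PySem.Set String × PySem.Set String :=
  if items.length < 2 then st
  else if PySem.Set.contains st.2 (PySem.List.pyGetD items (-2) "") then st
  else
    match PySem.Int.ofStr? (PySem.List.pyGetD items (-2) "") with
    | none => st   -- int(idx) raised, caught by the bare except
    | some _ =>
      if PySem.List.pyGetD items (-1) "" == "DELETE" then
        (PySem.Set.discard st.1 (PySem.List.pyGetD items (-2) ""),
         PySem.Set.add st.2 (PySem.List.pyGetD items (-2) ""))
      else
        (PySem.Set.add st.1 (PySem.List.pyGetD items (-2) ""), st.2)

def get_deleted_step (st : PySem.Set String × PySem.Set String) (key : String) :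
    PySem.Set String × PySem.Set String :=
  get_deleted_inner st ((PySem.Str.split? key "-").getD [])   -- sep "-" ≠ "": getD never used

def get_deleted (keys : List String) : List String × List String :=
  let st := keys.foldl get_deleted_step (PySem.Set.empty, PySem.Set.empty)
  (st.2, st.1)

-- ===== PORT B =====
def parse_key (key : String) : Option (String × Bool) :=
  let items := (PySem.Str.split? key "-").getD []   -- sep "-" ≠ "": getD never used
  if items.length < 2 then none
  else
    match PySem.Int.ofStr? (PySem.List.pyGetD items (-2) "") with
    | none => none   -- int(items[-2]) raised ValueError
    | some _ => some (PySem.List.pyGetD items (-2) "", PySem.List.pyGetD items (-1) "" == "DELETE")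

def get_deleted_alt (keys : List String) : List String × List String :=
  let parsed := keys.filterMap parse_key
  let toDelete : PySem.Set String :=
    PySem.Set.ofList ((parsed.filter (fun p => p.2)).map Prod.fst)
  let notToDelete : PySem.Set String :=
    PySem.Set.diff (PySem.Set.ofList ((parsed.filter (fun p => !p.2)).map Prod.fst)) toDelete
  (toDelete, notToDelete)

-- ===== PRECONDITION & SPEC =====
def Spec_get_deleted (keys : List String) (out : List String × List String) : Prop := out = get_deleted_alt keys
instance (keys : List String) (out : List String × List String) : Decidable (Spec_get_deleted keys out) := by unfold Spec_get_deleted; infer_instance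

-- ===== CLAIM (what is proved, stated in full; the proofs are below) =====
def Claim_equal_get_deleted : Prop := ∀ (keys : List String), Dom_get_deleted keys → Spec_get_deleted keys (get_deleted keys)

-- ===== LEMMAS AND PROOFS =====

-- A's state is (not_to_delete, to_delete); abstract it from a pair (dels, keeps) of raw accumulators.
def pvAbs (st : PySem.Set String × PySem.Set String) : PySem.Set String × PySem.Set String :=
  (PySem.Set.diff st.2 st.1, st.1)

-- fold step on parsed pairs: accumulate (dels, keeps) independently
def pvStep (st : PySem.Set String × PySem.Set String) (p : String × Bool) :
    PySem.Set String × PySem.Set String :=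
  if p.2 then (PySem.Set.add st.1 p.1, st.2) else (st.1, PySem.Set.add st.2 p.1)

lemma pv_diff_append_mem (k d : List String) (i : String) (h : i ∈ d) :
    PySem.Set.diff (k ++ [i]) d = PySem.Set.diff k d := by
  simp [PySem.Set.diff, List.filter_append, h]

lemma pv_diff_append_not_mem (k d : List String) (i : String) (h : i ∉ d) :
    PySem.Set.diff (k ++ [i]) d = PySem.Set.diff k d ++ [i] := by
  simp [PySem.Set.diff, List.filter_append, h]

lemma pv_step_abs (d k : PySem.Set String) (key : String) :
    get_deleted_step (pvAbs (d, k)) key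
      = pvAbs ((parse_key key).elim (d, k) (pvStep (d, k))) := by
  unfold get_deleted_step get_deleted_inner parse_key
  generalize ((PySem.Str.split? key "-").getD []) = items
  by_cases hlen : items.length < 2
  · simp [hlen, pvAbs]
  · simp only [if_neg hlen]
    rcases hparse : PySem.Int.ofStr? (PySem.List.pyGetD items (-2) "") with _ | n
    · simp [pvAbs]
    · generalize (PySem.List.pyGetD items (-2) "" : String) = idx at *
      simp only [Option.elim_some]
      by_cases hmem : idx ∈ d
      · -- A skips (idx already in to_delete); B's add is a no-op on d, filtered out of diff
        rw [if_pos (by simpa [PySem.Set.contains_iff, pvAbs] using hmem)]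
        unfold pvStep pvAbs
        by_cases hdel : (PySem.List.pyGetD items (-1) "" == "DELETE") = true
        · simp [hdel, PySem.Set.add_of_mem hmem]
        · simp only [Bool.not_eq_true] at hdel
          simp only [hdel, Bool.false_eq_true, if_false]
          by_cases hk : idx ∈ k
          · simp [PySem.Set.add_of_mem hk]
          · simp [PySem.Set.add_of_not_mem hk, pv_diff_append_mem k d idx hmem]
      · rw [if_neg (by simpa [PySem.Set.contains_iff, pvAbs] using hmem)]
        unfold pvStep pvAbs
        by_cases hdel : (PySem.List.pyGetD items (-1) "" == "DELETE") = true
        · -- fresh DELETE: discard from the diff = diff against the extended dels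
          simp only [hdel, if_true]
          refine Prod.ext ?_ (by simp)
          simp [PySem.Set.add_of_not_mem hmem, PySem.Set.diff, PySem.Set.discard,
                List.filter_filter]
          exact List.filter_congr (fun x _ => by
            by_cases hx : x = idx <;> simp [hx, hmem])
        · -- fresh non-DELETE: A adds to the diff iff idx is new in keeps
          simp only [Bool.not_eq_true] at hdel
          simp only [hdel, Bool.false_eq_true, if_false]
          refine Prod.ext ?_ (by simp)
          by_cases hk : idx ∈ k
          · have : idx ∈ PySem.Set.diff k d := by
              simp [PySem.Set.diff, List.mem_filter, hk, hmem]
            simp [PySem.Set.add_of_mem hk, PySem.Set.add_of_mem this]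
          · have : idx ∉ PySem.Set.diff k d := fun hin => hk (List.mem_of_mem_filter hin)
            simp [PySem.Set.add_of_not_mem hk, PySem.Set.add_of_not_mem this,
                  pv_diff_append_not_mem k d idx hmem]

lemma pv_fold_abs (keys : List String) (d k : PySem.Set String) :
    keys.foldl get_deleted_step (pvAbs (d, k))
      = pvAbs ((keys.filterMap parse_key).foldl pvStep (d, k)) := by
  induction keys generalizing d k with
  | nil => rfl
  | cons key rest ih =>
    simp only [List.foldl_cons, List.filterMap_cons]
    rw [pv_step_abs]
    rcases hp : parse_key key with _ | p
    · simpa using ih d k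
    · simp only [Option.elim_some, List.foldl_cons]
      have := ih (pvStep (d, k) p).1 (pvStep (d, k) p).2
      simpa using this

lemma pv_fold_split (ps : List (String × Bool)) (d k : PySem.Set String) :
    ps.foldl pvStep (d, k)
      = (((ps.filter (fun p => p.2)).map Prod.fst).foldl PySem.Set.add d,
         ((ps.filter (fun p => !p.2)).map Prod.fst).foldl PySem.Set.add k) := by
  induction ps generalizing d k with
  | nil => rfl
  | cons p rest ih =>
    rcases p with ⟨i, del⟩
    cases del <;> simp [List.foldl_cons, pvStep, ih]

-- ===== VERDICT (by name: the statement is the Claim_ definition above) =====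
theorem get_deleted_spec : Claim_equal_get_deleted := by
  intro keys _
  show get_deleted keys = get_deleted_alt keys
  have hinit : ((PySem.Set.empty, PySem.Set.empty) : PySem.Set String × PySem.Set String)
      = pvAbs (PySem.Set.empty, PySem.Set.empty) := rfl
  simp only [get_deleted, get_deleted_alt]
  rw [hinit, pv_fold_abs, pv_fold_split]
  rfl
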